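-- pv_equiv track=rewrite | github.com/RavinSG/Computational_Biology | fragile_genome.py | coloured_edges
-- ===== SOURCE A (Python) =====
-- def chromosome_to_cycle(chromosome: list) -> list:
--     """
--     Transform a single circular chromosome, Chromosome = (Chromosome_1, . . . , Chromosome_n) into a cycle represented
--     as a sequence of integers Nodes = (Nodes_1, . . . , Nodes_2n).
--
--     :param chromosome: A circular chromosome
--     :return: The node sequence of the cycle
--     """
--     cycle = []
--     k = len(chromosome)
--     for i in range(1, k + 1):
--         j = chromosome[i - 1]
--         j = j * 2
--         if j > 0:
--             cycle += [j - 1, j]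
--         else:
--             cycle += [-j, -j - 1]
--     return cycle
--
-- def coloured_edges(chromosomes: list) -> list:
--     """
--     Colored edges are defined as edges joining synteny blocks in a chromosome.
--
--     :param chromosomes: A list of chromosomes
--     :return: The coloured edges of the graph created by the choromosomes
--     """
--     edges = []
--     for chromosome in chromosomes:
--         cycle = chromosome_to_cycle(chromosome)
--         k = len(cycle)
--         for i in range(1, k - 2, 2):
--             edges.append((cycle[i], cycle[i + 1]))
--
--         edges.append((cycle[-1], cycle[0]))
--
--     return edges
-- ===== SOURCE B (Python) =====
-- def coloured_edges(chromosomes: list) -> list: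
--     edges = []
--     for chromosome in chromosomes:
--         first_head = None
--         prev_tail = None
--         for v in chromosome:
--             head, tail = (2 * v - 1, 2 * v) if v > 0 else (-2 * v, -2 * v - 1)
--             if first_head is None:
--                 first_head = head
--             else:
--                 edges.append((prev_tail, head))
--             prev_tail = tail
--         edges.append((prev_tail, first_head))
--     return edges
-- ===== Notes on version B (the rewrite author's own statement) =====
-- stated objective: alternative
-- what changed: Replaces A's staged build-then-scan (materialise the flat interleaved cycle list, then read it back with a step-2 index loop and negative indexing) by one streaming pass over each chromosome that carries only first_head/prev_tail state and never builds or indexes an intermediate list.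
import Mathlib
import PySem

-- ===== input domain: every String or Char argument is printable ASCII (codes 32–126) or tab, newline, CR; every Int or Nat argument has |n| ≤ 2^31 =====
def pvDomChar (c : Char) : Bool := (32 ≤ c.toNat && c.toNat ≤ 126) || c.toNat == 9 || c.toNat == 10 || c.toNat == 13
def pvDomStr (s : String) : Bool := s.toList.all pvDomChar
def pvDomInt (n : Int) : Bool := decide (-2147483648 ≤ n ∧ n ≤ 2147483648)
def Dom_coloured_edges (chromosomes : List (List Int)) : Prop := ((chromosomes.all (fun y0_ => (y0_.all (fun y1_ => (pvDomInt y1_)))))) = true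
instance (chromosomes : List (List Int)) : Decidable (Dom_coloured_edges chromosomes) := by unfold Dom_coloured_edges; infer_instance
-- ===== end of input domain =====

-- B replaces A's staged build-then-index-scan (flat interleaved cycle list + step-2 index
-- loop) by a single streaming pass carrying first_head/prev_tail state; objective: alternative.


-- ===== PORT A =====
def chromosome_to_cycle (chromosome : List Int) : List Int :=
  (PySem.List.pyRange 1 ((chromosome.length : Int) + 1) 1).foldl (fun cycle i =>
    let j := (PySem.List.pyGetD chromosome (i - 1) 0) * 2
    if j > 0 then cycle ++ [j - 1, j] else cycle ++ [-j, -j - 1]) []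

def coloured_edges (chromosomes : List (List Int)) : List (Int × Int) :=
  chromosomes.foldl (fun edges chromosome =>
    let cycle := chromosome_to_cycle chromosome
    let k := (cycle.length : Int)
    let edges := (PySem.List.pyRange 1 (k - 2) 2).foldl (fun edges i =>
      edges ++ [(PySem.List.pyGetD cycle i 0, PySem.List.pyGetD cycle (i + 1) 0)]) edges
    edges ++ [(PySem.List.pyGetD cycle (-1) 0, PySem.List.pyGetD cycle 0 0)]) []

-- ===== PORT B =====
-- Python B's None sentinels become Option Int; the final '.getD 0' totalises the read of the
-- sentinels, which inside Pre_ (no empty chromosome) are always 'some'.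
def coloured_edges_alt (chromosomes : List (List Int)) : List (Int × Int) :=
  chromosomes.foldl (fun edges chromosome =>
    let st := chromosome.foldl
      (fun (st : List (Int × Int) × Option Int × Option Int) v =>
        let ht := if v > 0 then (2 * v - 1, 2 * v) else (-2 * v, -2 * v - 1)
        match st.2.1 with
        | none => (st.1, some ht.1, some ht.2)
        | some _ => (st.1 ++ [(st.2.2.getD 0, ht.1)], st.2.1, some ht.2))
      (edges, none, none)
    st.1 ++ [(st.2.2.getD 0, st.2.1.getD 0)]) []

-- ===== PRECONDITION & SPEC =====
-- Pre_ excludes inputs containing an empty chromosome: there A raises IndexError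
-- (cycle[-1] on the empty cycle), while B's untyped None sentinels would leak out.
def Pre_coloured_edges (chromosomes : List (List Int)) : Prop :=
  ∀ c ∈ chromosomes, c ≠ []
instance (chromosomes : List (List Int)) : Decidable (Pre_coloured_edges chromosomes) := by
  unfold Pre_coloured_edges; infer_instance
def pvWitness_coloured_edges : List (List Int) := [[1, -3, 2], [-2]]

def Spec_coloured_edges (chromosomes : List (List Int)) (out : List (Int × Int)) : Prop := out = coloured_edges_alt chromosomes
instance (chromosomes : List (List Int)) (out : List (Int × Int)) : Decidable (Spec_coloured_edges chromosomes out) := by unfold Spec_coloured_edges; infer_instance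

-- ===== CLAIM (what is proved, stated in full; the proofs are below) =====
def Claim_equal_coloured_edges : Prop := ∀ (chromosomes : List (List Int)), Dom_coloured_edges chromosomes → Pre_coloured_edges chromosomes → Spec_coloured_edges chromosomes (coloured_edges chromosomes)

-- ===== LEMMAS AND PROOFS =====

def pvPair (v : Int) : Int × Int := if v > 0 then (2 * v - 1, 2 * v) else (-2 * v, -2 * v - 1)

def pvNodes (v : Int) : List Int := [(pvPair v).1, (pvPair v).2]

lemma flatMap_getD_range {α β : Type} (c : List α) (g : α → List β) (d : α) :
    (List.range c.length).flatMap (fun k => g (c.getD k d)) = c.flatMap g := by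
  induction c with
  | nil => simp
  | cons x t ih =>
    simp only [List.length_cons, List.range_succ_eq_map, List.flatMap_cons, List.flatMap_map,
      List.getD_cons_zero, List.getD_cons_succ]
    rw [ih]

lemma cycle_eq (c : List Int) : chromosome_to_cycle c = c.flatMap pvNodes := by
  unfold chromosome_to_cycle
  have hbody : (fun (cycle : List Int) (i : Int) =>
      let j := (PySem.List.pyGetD c (i - 1) 0) * 2
      if j > 0 then cycle ++ [j - 1, j] else cycle ++ [-j, -j - 1])
    = fun cycle i => cycle ++ pvNodes (PySem.List.pyGetD c (i - 1) 0) := by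
    funext cycle i
    set v := PySem.List.pyGetD c (i - 1) 0 with hv
    simp only [pvNodes, pvPair]
    by_cases h : v > 0
    · rw [if_pos (by omega : v * 2 > 0), if_pos h]
      norm_num; ring
    · rw [if_neg (by omega : ¬ v * 2 > 0), if_neg h]
      norm_num; ring
  rw [hbody, PySem.List.foldl_append_eq_flatMap, PySem.List.pyRange_one, List.flatMap_map]
  have h1 : (((c.length : Int) + 1 - 1)).toNat = c.length := by norm_num
  rw [h1]
  have h2 : (fun (a : Nat) => pvNodes (PySem.List.pyGetD c (1 + (a : Int) - 1) 0))
       = fun (a : Nat) => pvNodes (c.getD a 0) := by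
    funext a
    have : (1 + (a : Int) - 1) = (a : Int) := by ring
    rw [this, PySem.List.pyGetD_natCast]
  rw [h2, flatMap_getD_range, List.nil_append]

lemma flat_length (c : List Int) : (c.flatMap pvNodes).length = 2 * c.length := by
  induction c with
  | nil => simp
  | cons x t ih => simp [pvNodes, ih]; omega

lemma flat_getD (c : List Int) (k : Nat) (hk : k < c.length) :
    (c.flatMap pvNodes).getD (2 * k) 0 = (pvPair (c.getD k 0)).1 ∧
    (c.flatMap pvNodes).getD (2 * k + 1) 0 = (pvPair (c.getD k 0)).2 := by
  induction c generalizing k with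
  | nil => simp at hk
  | cons x t ih =>
    cases k with
    | zero => simp [pvNodes]
    | succ m =>
      have hm : m < t.length := by simpa using hk
      have h2 : 2 * (m + 1) = (2 * m) + 1 + 1 := by ring
      simp only [pvNodes, List.flatMap_cons, List.cons_append, List.nil_append, h2,
        List.getD_cons_succ]
      exact ih m hm

lemma range_odd (n : Nat) (hn : 1 ≤ n) :
    PySem.List.pyRange 1 (2 * (n : Int) - 2) 2
      = (List.range (n - 1)).map (fun (k : Nat) => 1 + 2 * (k : Int)) := by
  rw [PySem.List.pyRange_of_pos _ _ (by norm_num)]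
  have h : (if (1:Int) < 2 * (n : Int) - 2 then ((2 * (n : Int) - 2 - 1 + 2 - 1) / 2).toNat else 0)
      = n - 1 := by split_ifs <;> omega
  rw [h]

lemma flat_getD_getLast (c : List Int) (hc : c ≠ []) :
    (c.flatMap pvNodes).getLast (by
      intro h
      have := flat_length c
      rw [h] at this
      simp only [List.length_nil] at this
      exact hc (List.length_eq_zero_iff.mp (by omega))) = (pvPair (c.getD (c.length - 1) 0)).2 := by
  have hn : 1 ≤ c.length := List.length_pos_iff.mpr hc
  have hL := flat_length c
  rw [List.getLast_eq_getElem, ← List.getD_eq_getElem _ 0 (by omega)]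
  have h1 : (c.flatMap pvNodes).length - 1 = 2 * (c.length - 1) + 1 := by omega
  rw [h1]
  exact (flat_getD c (c.length - 1) (by omega)).2

-- the common per-chromosome normal form
def pvNF (edges : List (Int × Int)) (c : List Int) : List (Int × Int) :=
  edges ++ (List.range (c.length - 1)).map
      (fun m => ((pvPair (c.getD m 0)).2, (pvPair (c.getD (m + 1) 0)).1))
    ++ [((pvPair (c.getD (c.length - 1) 0)).2, (pvPair (c.getD 0 0)).1)]

lemma stepA_eq (edges : List (Int × Int)) (c : List Int) (hc : c ≠ []) :
    (let cycle := chromosome_to_cycle c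
     let k := (cycle.length : Int)
     let edges := (PySem.List.pyRange 1 (k - 2) 2).foldl (fun edges i =>
       edges ++ [(PySem.List.pyGetD cycle i 0, PySem.List.pyGetD cycle (i + 1) 0)]) edges
     edges ++ [(PySem.List.pyGetD cycle (-1) 0, PySem.List.pyGetD cycle 0 0)])
    = pvNF edges c := by
  have hn : 1 ≤ c.length := List.length_pos_iff.mpr hc
  have hL := flat_length c
  have hLne : c.flatMap pvNodes ≠ [] := by
    intro h; rw [h] at hL; simp only [List.length_nil] at hL; omega
  simp only [cycle_eq]
  have hk : ((c.flatMap pvNodes).length : Int) - 2 = 2 * (c.length : Int) - 2 := by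
    rw [hL]; push_cast; ring
  rw [hk, range_odd c.length hn, PySem.List.foldl_append_singleton_eq_map, List.map_map]
  unfold pvNF
  congr 1
  · congr 1
    apply List.map_congr_left
    intro m hm
    have hm' : m < c.length - 1 := List.mem_range.mp hm
    simp only [Function.comp]
    have e1 : (1 + 2 * (m : Int)) = ((2 * m + 1 : Nat) : Int) := by push_cast; ring
    have e2 : ((2 * m + 1 : Nat) : Int) + 1 = ((2 * (m + 1) : Nat) : Int) := by push_cast; ring
    rw [e1, e2, PySem.List.pyGetD_natCast, PySem.List.pyGetD_natCast]
    rw [(flat_getD c m (by omega)).2, (flat_getD c (m + 1) (by omega)).1]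
  · rw [PySem.List.pyGetD_neg_one _ _ hLne, PySem.List.pyGetD_zero]
    rw [flat_getD_getLast c hc]
    have : (c.flatMap pvNodes).getD 0 0 = (c.flatMap pvNodes).getD (2 * 0) 0 := by norm_num
    rw [this, (flat_getD c 0 (by omega)).1]

-- characterisation of B's streaming inner fold
def pvStep (st : List (Int × Int) × Option Int × Option Int) (v : Int) :
    List (Int × Int) × Option Int × Option Int :=
  let ht := if v > 0 then (2 * v - 1, 2 * v) else (-2 * v, -2 * v - 1)
  match st.2.1 with
  | none => (st.1, some ht.1, some ht.2)
  | some _ => (st.1 ++ [(st.2.2.getD 0, ht.1)], st.2.1, some ht.2)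

def pvChain (pt : Int) (t : List Int) : List (Int × Int) :=
  match t with
  | [] => []
  | v :: r => (pt, (pvPair v).1) :: pvChain (pvPair v).2 r

def pvLastT (pt : Int) (t : List Int) : Int :=
  match t with
  | [] => pt
  | v :: r => pvLastT (pvPair v).2 r

lemma inner_fold (t : List Int) (edges : List (Int × Int)) (fh pt : Int) :
    t.foldl pvStep (edges, some fh, some pt)
      = (edges ++ pvChain pt t, some fh, some (pvLastT pt t)) := by
  induction t generalizing edges pt with
  | nil => simp [pvChain, pvLastT]
  | cons v r ih =>
    simp only [List.foldl_cons, pvChain, pvLastT]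
    rw [show pvStep (edges, some fh, some pt) v
        = (edges ++ [(pt, (pvPair v).1)], some fh, some (pvPair v).2) from by
      simp [pvStep, pvPair]]
    rw [ih]
    simp

lemma chain_eq (t : List Int) (x : Int) :
    pvChain (pvPair x).2 t
      = (List.range t.length).map
          (fun m => ((pvPair ((x :: t).getD m 0)).2, (pvPair ((x :: t).getD (m + 1) 0)).1)) := by
  induction t generalizing x with
  | nil => simp [pvChain]
  | cons v r ih =>
    simp only [pvChain, List.length_cons, List.range_succ_eq_map, List.map_cons, List.map_map]
    congr 1
    rw [ih v]
    apply List.map_congr_left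
    intro m _
    rfl

lemma lastT_eq (t : List Int) (x : Int) :
    pvLastT (pvPair x).2 t = (pvPair ((x :: t).getD t.length 0)).2 := by
  induction t generalizing x with
  | nil => simp [pvLastT]
  | cons v r ih =>
    simp only [pvLastT, List.length_cons, List.getD_cons_succ]
    exact ih v

lemma stepB_eq (edges : List (Int × Int)) (c : List Int) (hc : c ≠ []) :
    (let st := c.foldl pvStep (edges, none, none)
     st.1 ++ [(st.2.2.getD 0, st.2.1.getD 0)])
    = pvNF edges c := by
  obtain ⟨x, t, rfl⟩ := List.exists_cons_of_ne_nil hc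
  simp only [List.foldl_cons]
  rw [show pvStep ((edges, none, none) : List (Int × Int) × Option Int × Option Int) x
      = (edges, some (pvPair x).1, some (pvPair x).2) from by simp [pvStep, pvPair]]
  rw [inner_fold]
  simp only [Option.getD_some]
  unfold pvNF
  rw [chain_eq t x, lastT_eq t x]
  simp [List.append_assoc]

lemma fold_main (l : List (List Int)) (init : List (Int × Int)) (h : ∀ c ∈ l, c ≠ []) :
    l.foldl (fun edges chromosome =>
      let cycle := chromosome_to_cycle chromosome
      let k := (cycle.length : Int)
      let edges := (PySem.List.pyRange 1 (k - 2) 2).foldl (fun edges i =>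
        edges ++ [(PySem.List.pyGetD cycle i 0, PySem.List.pyGetD cycle (i + 1) 0)]) edges
      edges ++ [(PySem.List.pyGetD cycle (-1) 0, PySem.List.pyGetD cycle 0 0)]) init
    = l.foldl (fun edges chromosome =>
      let st := chromosome.foldl pvStep (edges, none, none)
      st.1 ++ [(st.2.2.getD 0, st.2.1.getD 0)]) init := by
  induction l generalizing init with
  | nil => rfl
  | cons c t ih =>
    simp only [List.foldl_cons]
    rw [stepA_eq init c (h c List.mem_cons_self), stepB_eq init c (h c List.mem_cons_self)]
    exact ih (pvNF init c) (fun x hx => h x (List.mem_cons_of_mem c hx))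

-- ===== VERDICT (by name: the statement is the Claim_ definition above) =====
theorem coloured_edges_spec : Claim_equal_coloured_edges := by
  intro chromosomes _ hpre
  unfold Spec_coloured_edges coloured_edges coloured_edges_alt
  exact fold_main chromosomes [] hpre
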